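-- pv_equiv track=rewrite | github.com/simyinci/Bioinformatics-Institute-Programming-Assessment | code_question_4.py | group_connected_labels
-- ===== SOURCE A (Python) =====
-- def group_connected_labels (equiv_lb):
--
--     equiv_lb.sort()   # sort the list in ascending order
--
--     # create a list that stores distinct groups of "connected" labels
--     # assign the smallest pair of equivalent labels as the first group
--     equiv_lb_gp = [equiv_lb[0]]
--
--     for i in range (1, len(equiv_lb)):
--
--         # create boolean variable to track if a pair of equivalent labels
--         # belong to any groups in equiv_lb_gp
--         extend = False
--
--         if (equiv_lb[i] != equiv_lb[i-1]):   # only check unique pairs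
--
--             for j in range (len(equiv_lb_gp)):
--
--                 for k in range (len(equiv_lb_gp[j])):
--
--                     if ((equiv_lb[i][0] == equiv_lb_gp[j][k]) or
--                         (equiv_lb[i][1] == equiv_lb_gp[j][k])):
--                         # group "connected" labels
--                         equiv_lb_gp[j].extend(equiv_lb[i])
--                         # keep unique labels and sort in ascending order
--                         equiv_lb_gp[j] = sorted(set(equiv_lb_gp[j]))
--                         extend = True
--                         break
--
--             if extend == False:
--                 # assign the pair of equivalent labels as a new group
--                 equiv_lb_gp.append(equiv_lb[i])
--
--     return equiv_lb_gp
-- ===== SOURCE B (Python) =====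
-- # B: label->group-index dictionary replaces A's per-pair scan over all groups and
-- # their elements; only matched groups are touched. Return-value equivalence only:
-- # like A it sorts the input in place, but A additionally extends aliased inner lists.
-- def group_connected_labels(equiv_lb):
--     equiv_lb.sort()
--     groups = []
--     idx = {}          # label -> set of indices of groups containing it
--     prev = None
--     for pair in equiv_lb:
--         if pair == prev:
--             continue
--         prev = pair
--         matched = sorted(idx.get(pair[0], set()) | idx.get(pair[1], set()))
--         if matched:
--             for j in matched:
--                 groups[j] = sorted(set(groups[j] + pair))
--                 for lb in pair:
--                     idx.setdefault(lb, set()).add(j)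
--         else:
--             j = len(groups)
--             groups.append(pair)
--             for lb in pair:
--                 idx.setdefault(lb, set()).add(j)
--     return groups
-- ===== Notes on version B (the rewrite author's own statement) =====
-- stated objective: alternative
-- what changed: B replaces A's per-pair rescan of every group and every group element by a label->set-of-group-indices dictionary maintained incrementally, so each pair looks up and updates only the groups it matches.
-- outside the precondition, e.g. on group_connected_labels([[1]]): A returns [[1]], B raises IndexError; on group_connected_labels([[0], [5, 6]]): A returns [[0], [5, 6]], B raises IndexError
import Mathlib
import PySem

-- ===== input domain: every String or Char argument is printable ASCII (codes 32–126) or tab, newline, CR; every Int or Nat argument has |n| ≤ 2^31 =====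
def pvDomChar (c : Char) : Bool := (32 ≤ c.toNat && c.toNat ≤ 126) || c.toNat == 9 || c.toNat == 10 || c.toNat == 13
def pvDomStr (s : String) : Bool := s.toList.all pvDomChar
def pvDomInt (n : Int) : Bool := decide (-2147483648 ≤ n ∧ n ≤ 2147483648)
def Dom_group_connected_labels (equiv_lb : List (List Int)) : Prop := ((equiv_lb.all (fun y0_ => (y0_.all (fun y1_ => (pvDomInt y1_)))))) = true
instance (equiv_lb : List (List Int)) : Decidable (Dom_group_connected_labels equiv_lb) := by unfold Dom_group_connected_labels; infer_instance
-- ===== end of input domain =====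

-- B replaces A's per-pair scan over every group and every group element by a
-- label -> group-index dictionary, touching only the matched groups.
-- Return-value equivalence only: like A, B sorts its argument in place; A
-- additionally mutates (extends) inner lists aliased into its result.

-- sorted(set(g + p))  — the identical subexpression both Pythons use to extend a group
def pyExt (g p : List Int) : List Int :=
  PySem.List.sorted (PySem.Set.ofList (g ++ p)) (fun x => x) false

-- ===== PORT A =====
-- inner k-loop: does pair[0] or pair[1] occur in group g?
def pyA_matches (p g : List Int) : Bool :=
  g.any (fun x => (PySem.List.pyGet? p 0 == some x) || (PySem.List.pyGet? p 1 == some x))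

-- j-loop over the groups: extend every matching group, report whether any matched
def pyA_scan (p : List Int) : List (List Int) → List (List Int) × Bool
  | [] => ([], false)
  | g :: rest =>
    let r := pyA_scan p rest
    if pyA_matches p g then (pyExt g p :: r.1, true) else (g :: r.1, r.2)

-- i-loop: prev is equiv_lb[i-1]
def pyA_loop (gp : List (List Int)) (prev : List Int) : List (List Int) → List (List Int)
  | [] => gp
  | p :: rest =>
    if p ≠ prev then
      let r := pyA_scan p gp
      pyA_loop (if r.2 then r.1 else r.1 ++ [p]) p rest
    else pyA_loop gp p rest

def group_connected_labels (equiv_lb : List (List Int)) : List (List Int) :=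
  match PySem.List.sorted equiv_lb (fun x => x) false with
  | [] => []              -- Python raises IndexError here (excluded by Pre_)
  | h :: t => pyA_loop [h] h t

-- ===== PORT B =====
-- for lb in pair: idx.setdefault(lb, set()).add(j)
def pyB_index (idx : PySem.Dict Int (PySem.Set Nat)) (p : List Int) (j : Nat) :
    PySem.Dict Int (PySem.Set Nat) :=
  p.foldl (fun d lb => d.insert lb (PySem.Set.add (d.getD lb PySem.Set.empty) j)) idx

def pyB_loop (groups : List (List Int)) (idx : PySem.Dict Int (PySem.Set Nat))
    (prev : Option (List Int)) : List (List Int) → List (List Int)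
  | [] => groups
  | p :: rest =>
    if some p = prev then pyB_loop groups idx prev rest
    else
      match PySem.List.pyGet? p 0, PySem.List.pyGet? p 1 with
      | some x, some y =>
        let matched := PySem.List.sorted
          (PySem.Set.union (idx.getD x PySem.Set.empty) (idx.getD y PySem.Set.empty))
          (fun j => j) false
        if matched ≠ [] then
          let s := matched.foldl
            (fun (s : List (List Int) × PySem.Dict Int (PySem.Set Nat)) j =>
              (s.1.set j (pyExt (s.1.getD j []) p), pyB_index s.2 p j))
            (groups, idx)
          pyB_loop s.1 s.2 (some p) rest
        else
          pyB_loop (groups ++ [p]) (pyB_index idx p groups.length) (some p) rest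
      | _, _ => groups    -- Python raises IndexError here (excluded by Pre_)

def group_connected_labels_alt (equiv_lb : List (List Int)) : List (List Int) :=
  pyB_loop [] PySem.Dict.empty none (PySem.List.sorted equiv_lb (fun x => x) false)

-- ===== PRECONDITION & SPEC =====
-- Pre_ is the natural domain: a nonempty list of pairs (length ≥ 2; A uses only indices
-- 0 and 1 to match but accepts longer lists).  A raises IndexError on the empty list and
-- on most inputs holding a shorter inner list; it does return on a few such inputs where
-- the short list sorts first or its 0th element short-circuits the match, but those lie
-- outside the function's intended pairs-only domain, so Pre_ excludes all of them.
def Pre_group_connected_labels (equiv_lb : List (List Int)) : Prop :=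
  equiv_lb ≠ [] ∧ ∀ p ∈ equiv_lb, 2 ≤ p.length
instance (equiv_lb : List (List Int)) : Decidable (Pre_group_connected_labels equiv_lb) := by
  unfold Pre_group_connected_labels; infer_instance

def pvWitness_group_connected_labels : List (List Int) := [[1, 2], [2, 3], [5, 6]]

def Spec_group_connected_labels (equiv_lb : List (List Int)) (out : List (List Int)) : Prop :=
  out = group_connected_labels_alt equiv_lb
instance (equiv_lb : List (List Int)) (out : List (List Int)) :
    Decidable (Spec_group_connected_labels equiv_lb out) := by
  unfold Spec_group_connected_labels; infer_instance

-- ===== CLAIM (what is proved, stated in full; the proofs are below) =====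
def Claim_equal_group_connected_labels : Prop :=
  ∀ (equiv_lb : List (List Int)), Dom_group_connected_labels equiv_lb →
    Pre_group_connected_labels equiv_lb →
    Spec_group_connected_labels equiv_lb (group_connected_labels equiv_lb)

-- ===== LEMMAS AND PROOFS =====

-- invariant: idx maps each label to exactly the set of indices of groups containing it,
-- and every stored index set is duplicate-free
def InvIdx (idx : PySem.Dict Int (PySem.Set Nat)) (gs : List (List Int)) : Prop :=
  (∀ (lb : Int) (j : Nat),
      j ∈ PySem.Dict.getD idx lb PySem.Set.empty ↔ (j < gs.length ∧ lb ∈ gs.getD j [])) ∧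
  (∀ (lb : Int), (PySem.Dict.getD idx lb PySem.Set.empty).Nodup)

theorem getD_elem (gs : List (List Int)) (j : Nat) (hj : j < gs.length) :
    gs.getD j [] = gs[j] :=
  List.getD_eq_getElem _ _ hj

theorem mem_pyExt (g p : List Int) (lb : Int) : lb ∈ pyExt g p ↔ lb ∈ g ∨ lb ∈ p := by
  simp [pyExt, PySem.List.mem_sorted, PySem.Set.mem_ofList]

theorem matches_iff (p g : List Int) (x y : Int)
    (h0 : PySem.List.pyGet? p 0 = some x) (h1 : PySem.List.pyGet? p 1 = some y) :
    pyA_matches p g = true ↔ (x ∈ g ∨ y ∈ g) := by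
  simp only [pyA_matches, List.any_eq_true, h0, h1, Bool.or_eq_true, beq_iff_eq,
    Option.some.injEq]
  constructor
  · rintro ⟨e, he, rfl | rfl⟩
    · exact Or.inl he
    · exact Or.inr he
  · rintro (hx | hy)
    · exact ⟨x, hx, Or.inl rfl⟩
    · exact ⟨y, hy, Or.inr rfl⟩

theorem scan_eq (p : List Int) : ∀ (gs : List (List Int)),
    pyA_scan p gs =
      (gs.map (fun g => if pyA_matches p g then pyExt g p else g), gs.any (pyA_matches p))
  | [] => rfl
  | g :: rest => by
    simp only [pyA_scan, scan_eq p rest, List.map_cons, List.any_cons]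
    cases h : pyA_matches p g
    · simp
    · simp

theorem foldl_pair_split (p : List Int) :
    ∀ (l : List Nat) (a : List (List Int)) (b : PySem.Dict Int (PySem.Set Nat)),
      (l.foldl (fun s j => (s.1.set j (pyExt (s.1.getD j []) p), pyB_index s.2 p j)) (a, b)) =
        (l.foldl (fun gs j => gs.set j (pyExt (gs.getD j []) p)) a,
         l.foldl (fun d j => pyB_index d p j) b)
  | [], a, b => rfl
  | j :: rest, a, b => by
    simp only [List.foldl_cons]
    exact foldl_pair_split p rest _ _

theorem getD_mapIdx (gs : List (List Int)) (F : Nat → List Int → List Int) (j : Nat)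
    (hj : j < gs.length) : (gs.mapIdx F).getD j [] = F j gs[j] := by
  rw [List.getD_eq_getElem _ _ (by simpa using hj)]
  simp

theorem foldl_set_eq_mapIdx (p : List Int) :
    ∀ (js : List Nat) (gs : List (List Int)), js.Nodup → (∀ j ∈ js, j < gs.length) →
      js.foldl (fun gs j => gs.set j (pyExt (gs.getD j []) p)) gs =
        gs.mapIdx (fun j g => if j ∈ js then pyExt g p else g)
  | [], gs, _, _ => by
    simp only [List.foldl_nil]
    refine (List.ext_getElem (by simp) ?_).symm
    intro i h1 h2
    simp
  | j :: rest, gs, hnd, hb => by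
    simp only [List.foldl_cons]
    have hjlen : j < gs.length := hb j (List.mem_cons_self ..)
    have hnd' : rest.Nodup := (List.nodup_cons.mp hnd).2
    have hjni : j ∉ rest := (List.nodup_cons.mp hnd).1
    rw [foldl_set_eq_mapIdx p rest _ hnd' (fun i hi => by
      simpa using hb i (List.mem_cons_of_mem _ hi))]
    refine List.ext_getElem (by simp) ?_
    intro i h1 h2
    simp only [List.getElem_mapIdx, List.getElem_set]
    by_cases hij : i = j
    · subst hij
      rw [if_neg hjni, if_pos rfl, if_pos (show i ∈ i :: rest by simp),
        getD_elem _ _ hjlen]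
    · simp only [if_neg (Ne.symm hij)]
      have : (i ∈ j :: rest) ↔ (i ∈ rest) := by
        simp [List.mem_cons, hij]
      simp [this]

theorem getD_pyB_index (j : Nat) :
    ∀ (p : List Int) (idx : PySem.Dict Int (PySem.Set Nat)) (x : Int),
      PySem.Dict.getD (pyB_index idx p j) x PySem.Set.empty =
        if x ∈ p then PySem.Set.add (PySem.Dict.getD idx x PySem.Set.empty) j
        else PySem.Dict.getD idx x PySem.Set.empty
  | [], idx, x => by simp [pyB_index]
  | lb :: rest, idx, x => by
    have step : pyB_index idx (lb :: rest) j =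
        pyB_index (idx.insert lb
          (PySem.Set.add (PySem.Dict.getD idx lb PySem.Set.empty) j)) rest j := by
      simp [pyB_index]
    rw [step, getD_pyB_index j rest _ x, PySem.Dict.getD_insert]
    by_cases hx : x = lb
    · subst hx
      by_cases hr : x ∈ rest
      · simp only [if_pos hr, if_pos (List.mem_cons_self ..)]
        exact PySem.Set.add_of_mem (by simp [PySem.Set.mem_add])
      · simp [hr]
    · simp only [if_neg hx]
      by_cases hr : x ∈ rest
      · simp [hr, List.mem_cons, hx]
      · simp [hr, List.mem_cons, hx]

theorem getD_foldl_pyB_index (p : List Int) :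
    ∀ (js : List Nat) (idx : PySem.Dict Int (PySem.Set Nat)) (x : Int),
      PySem.Dict.getD (js.foldl (fun d j => pyB_index d p j) idx) x PySem.Set.empty =
        if x ∈ p then PySem.Set.update (PySem.Dict.getD idx x PySem.Set.empty) js
        else PySem.Dict.getD idx x PySem.Set.empty
  | [], idx, x => by simp [PySem.Set.update]
  | j :: rest, idx, x => by
    simp only [List.foldl_cons]
    rw [getD_foldl_pyB_index p rest _ x, getD_pyB_index j p idx x]
    by_cases hx : x ∈ p
    · simp only [if_pos hx]
      rfl
    · simp [hx]

theorem inv_empty : InvIdx PySem.Dict.empty [] := by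
  constructor
  · intro lb j
    simp [PySem.Dict.getD_empty, PySem.Set.empty]
  · intro lb
    simp [PySem.Dict.getD_empty, PySem.Set.empty]

theorem inv_append (p : List Int) (gs : List (List Int))
    (idx : PySem.Dict Int (PySem.Set Nat)) (h : InvIdx idx gs) :
    InvIdx (pyB_index idx p gs.length) (gs ++ [p]) := by
  constructor
  · intro lb j
    rw [getD_pyB_index]
    have hget : (gs ++ [p]).getD j [] =
        if j < gs.length then gs.getD j [] else if j = gs.length then p else [] := by
      by_cases hj : j < gs.length
      · rw [List.getD_eq_getElem _ _ (by simp; omega), List.getElem_append_left hj]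
        simp [hj]
      · by_cases hj2 : j = gs.length
        · subst hj2
          rw [List.getD_eq_getElem _ _ (by simp)]
          simp
        · rw [List.getD_eq_default _ _ (by simp; omega)]
          simp [hj, hj2]
    by_cases hlb : lb ∈ p
    · rw [if_pos hlb, PySem.Set.mem_add, h.1 lb j, hget]
      constructor
      · rintro (⟨hj, hm⟩ | rfl)
        · exact ⟨by simp; omega, by rw [if_pos hj]; exact hm⟩
        · exact ⟨by simp, by simp [hlb]⟩
      · rintro ⟨hj, hm⟩
        simp only [List.length_append, List.length_cons, List.length_nil] at hj
        by_cases hjl : j < gs.length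
        · rw [if_pos hjl] at hm
          exact Or.inl ⟨hjl, hm⟩
        · have : j = gs.length := by omega
          exact Or.inr this
    · rw [if_neg hlb, h.1 lb j, hget]
      constructor
      · rintro ⟨hj, hm⟩
        exact ⟨by simp; omega, by rw [if_pos hj]; exact hm⟩
      · rintro ⟨hj, hm⟩
        simp only [List.length_append, List.length_cons, List.length_nil] at hj
        by_cases hjl : j < gs.length
        · rw [if_pos hjl] at hm
          exact ⟨hjl, hm⟩
        · rw [if_neg hjl] at hm
          have : j = gs.length := by omega
          rw [if_pos this] at hm
          exact absurd hm hlb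
  · intro lb
    rw [getD_pyB_index]
    by_cases hlb : lb ∈ p
    · rw [if_pos hlb]
      apply PySem.Set.nodup_add
      exact h.2 lb
    · rw [if_neg hlb]
      exact h.2 lb

theorem inv_extend (p : List Int) (x y : Int)
    (gs : List (List Int)) (idx : PySem.Dict Int (PySem.Set Nat)) (js : List Nat)
    (h : InvIdx idx gs)
    (hchar : ∀ j, j ∈ js ↔ (j < gs.length ∧ (x ∈ gs.getD j [] ∨ y ∈ gs.getD j []))) :
    InvIdx (js.foldl (fun d j => pyB_index d p j) idx)
      (gs.mapIdx (fun j g => if j ∈ js then pyExt g p else g)) := by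
  constructor
  · intro lb j
    rw [getD_foldl_pyB_index]
    have hlen : (gs.mapIdx (fun j g => if j ∈ js then pyExt g p else g)).length = gs.length := by
      simp
    constructor
    · intro hmem
      by_cases hlb : lb ∈ p
      · rw [if_pos hlb, PySem.Set.mem_update] at hmem
        rcases hmem with hold | hjs
        · rcases (h.1 lb j).mp hold with ⟨hj, hm⟩
          refine ⟨by omega, ?_⟩
          rw [getD_mapIdx _ _ _ hj]
          rw [getD_elem _ _ hj] at hm
          by_cases hjj : j ∈ js
          · simp [hjj, mem_pyExt, hm]
          · simpa [hjj] using hm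
        · have hj : j < gs.length := ((hchar j).mp hjs).1
          refine ⟨by omega, ?_⟩
          rw [getD_mapIdx _ _ _ hj]
          simp [hjs, mem_pyExt, hlb]
      · rw [if_neg hlb] at hmem
        rcases (h.1 lb j).mp hmem with ⟨hj, hm⟩
        refine ⟨by omega, ?_⟩
        rw [getD_mapIdx _ _ _ hj]
        by_cases hjj : j ∈ js
        · rw [getD_elem _ _ hj] at hm
          simp only [if_pos hjj, mem_pyExt]
          exact Or.inl hm
        · rw [getD_elem _ _ hj] at hm
          simpa [hjj] using hm
    · rintro ⟨hj, hm⟩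
      rw [hlen] at hj
      rw [getD_mapIdx _ _ _ hj] at hm
      by_cases hlb : lb ∈ p
      · rw [if_pos hlb, PySem.Set.mem_update]
        by_cases hjj : j ∈ js
        · exact Or.inr hjj
        · rw [if_neg hjj] at hm
          exact Or.inl ((h.1 lb j).mpr ⟨hj, by rw [getD_elem _ _ hj]; exact hm⟩)
      · rw [if_neg hlb]
        have hm' : lb ∈ gs[j] := by
          by_cases hjj : j ∈ js
          · rw [if_pos hjj, mem_pyExt] at hm
            rcases hm with hg | hp
            · exact hg
            · exact absurd hp hlb
          · rwa [if_neg hjj] at hm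
        exact (h.1 lb j).mpr ⟨hj, by rw [getD_elem _ _ hj]; exact hm'⟩
  · intro lb
    rw [getD_foldl_pyB_index]
    by_cases hlb : lb ∈ p
    · rw [if_pos hlb]
      apply PySem.Set.nodup_update
      exact h.2 lb
    · rw [if_neg hlb]
      exact h.2 lb

theorem matched_char (idx : PySem.Dict Int (PySem.Set Nat)) (gs : List (List Int))
    (x y : Int) (h : InvIdx idx gs) :
    (∀ j, j ∈ PySem.List.sorted
        (PySem.Set.union (PySem.Dict.getD idx x PySem.Set.empty)
          (PySem.Dict.getD idx y PySem.Set.empty)) (fun j => j) false ↔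
      (j < gs.length ∧ (x ∈ gs.getD j [] ∨ y ∈ gs.getD j []))) ∧
    (PySem.List.sorted
        (PySem.Set.union (PySem.Dict.getD idx x PySem.Set.empty)
          (PySem.Dict.getD idx y PySem.Set.empty)) (fun j => j) false).Nodup := by
  constructor
  · intro j
    rw [PySem.List.mem_sorted, PySem.Set.mem_union, h.1 x j, h.1 y j]
    constructor
    · rintro (⟨hj, hm⟩ | ⟨hj, hm⟩)
      · exact ⟨hj, Or.inl hm⟩
      · exact ⟨hj, Or.inr hm⟩
    · rintro ⟨hj, hm | hm⟩
      · exact Or.inl ⟨hj, hm⟩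
      · exact Or.inr ⟨hj, hm⟩
  · refine (PySem.List.sorted_perm _ _ _).nodup_iff.mpr ?_
    apply PySem.Set.nodup_union
    exact h.2 x

theorem loopEq : ∀ (rest gs : List (List Int)) (idx : PySem.Dict Int (PySem.Set Nat))
    (prev : List Int), (∀ p ∈ rest, 2 ≤ p.length) → InvIdx idx gs →
    pyB_loop gs idx (some prev) rest = pyA_loop gs prev rest
  | [], gs, idx, prev, _, _ => rfl
  | p :: rest, gs, idx, prev, hlen, hinv => by
    have hp2 : 2 ≤ p.length := hlen p (List.mem_cons_self ..)
    have hrest : ∀ q ∈ rest, 2 ≤ q.length := fun q hq => hlen q (List.mem_cons_of_mem _ hq)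
    by_cases hpp : p = prev
    · subst hpp
      simp only [pyB_loop, pyA_loop, ne_eq, not_true_eq_false, if_false]
      exact loopEq rest gs idx p hrest hinv
    · have h0 : PySem.List.pyGet? p 0 = some p[0] := by
        simpa using PySem.List.pyGet?_ofNat (xs := p) (n := 0) (by omega)
      have h1 : PySem.List.pyGet? p 1 = some p[1] := by
        simpa using PySem.List.pyGet?_ofNat (xs := p) (n := 1) (by omega)
      have hx : p[0] ∈ p := List.getElem_mem _
      have hy : p[1] ∈ p := List.getElem_mem _
      obtain ⟨hchar, hnd⟩ := matched_char idx gs p[0] p[1] hinv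
      have hifs : ¬ (some p = some prev) := by simp [hpp]
      simp only [pyB_loop, pyA_loop, if_neg hifs, if_pos hpp, h0, h1]
      rw [scan_eq]
      -- characterise the matched indices against A's per-group test
      have hmm : ∀ g ∈ gs, (pyA_matches p g = true ↔ (p[0] ∈ g ∨ p[1] ∈ g)) :=
        fun g _ => matches_iff p g _ _ h0 h1
      set ms := PySem.List.sorted
        (PySem.Set.union (PySem.Dict.getD idx p[0] PySem.Set.empty)
          (PySem.Dict.getD idx p[1] PySem.Set.empty)) (fun j => j) false with hms
      have hany : gs.any (pyA_matches p) = true ↔ ms ≠ [] := by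
        rw [List.any_eq_true]
        constructor
        · rintro ⟨g, hg, hmg⟩
          rcases List.mem_iff_getElem.mp hg with ⟨j, hj, rfl⟩
          have : j ∈ ms := (hchar j).mpr ⟨hj, by
            rw [List.getD_eq_getElem _ _ hj]
            exact (hmm _ hg).mp hmg⟩
          intro hnil
          rw [hnil] at this
          exact absurd this (List.not_mem_nil)
        · intro hne
          rcases List.exists_mem_of_ne_nil _ hne with ⟨j, hj⟩
          rcases (hchar j).mp hj with ⟨hjl, hm⟩
          refine ⟨gs[j], List.getElem_mem _, ?_⟩
          rw [(hmm _ (List.getElem_mem _))]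
          rwa [List.getD_eq_getElem _ _ hjl] at hm
      have hmapeq : gs.map (fun g => if pyA_matches p g then pyExt g p else g) =
          gs.mapIdx (fun j g => if j ∈ ms then pyExt g p else g) := by
        refine List.ext_getElem (by simp) ?_
        intro i hi1 hi2
        simp only [List.getElem_map, List.getElem_mapIdx]
        have hi : i < gs.length := by simpa using hi1
        have : pyA_matches p gs[i] = true ↔ i ∈ ms := by
          rw [hmm _ (List.getElem_mem _), hchar i, List.getD_eq_getElem _ _ hi]
          constructor
          · exact fun hh => ⟨hi, hh⟩
          · exact fun hh => hh.2
        by_cases hc : i ∈ ms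
        · rw [if_pos hc, if_pos (this.mpr hc)]
        · rw [if_neg hc, if_neg (by
            intro hb
            exact hc (this.mp hb))]
      by_cases hne : ms = []
      · have hanyf : gs.any (pyA_matches p) = false := by
          rw [← Bool.not_eq_true]
          intro hh
          exact (hany.mp hh) hne
        rw [if_neg (by simp [hne]), hanyf]
        simp only [Bool.false_eq_true, if_false]
        rw [hmapeq, hne]
        have : gs.mapIdx (fun j g => if j ∈ ([] : List Nat) then pyExt g p else g) = gs := by
          refine List.ext_getElem (by simp) ?_
          intro i h1 h2
          simp
        rw [this]
        exact loopEq rest (gs ++ [p]) _ p hrest (inv_append p gs idx hinv)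
      · have hanyt : gs.any (pyA_matches p) = true := hany.mpr hne
        rw [if_pos hne, hanyt]
        simp only [if_true]
        rw [foldl_pair_split p]
        have hbnd : ∀ j ∈ ms, j < gs.length := fun j hj => ((hchar j).mp hj).1
        rw [foldl_set_eq_mapIdx p ms gs hnd hbnd, hmapeq]
        exact loopEq rest _ _ p hrest
          (inv_extend p p[0] p[1] gs idx ms hinv hchar)
-- ===== VERDICT (by name: the statement is the Claim_ definition above) =====
theorem group_connected_labels_spec : Claim_equal_group_connected_labels := by
  unfold Claim_equal_group_connected_labels
  intro l _ hpre
  unfold Spec_group_connected_labels group_connected_labels group_connected_labels_alt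
  have hs : PySem.List.sorted l (fun x => x) false ≠ [] := by
    rw [Ne, PySem.List.sorted_eq_nil_iff]
    exact hpre.1
  rcases hsl : PySem.List.sorted l (fun x => x) false with _ | ⟨h, t⟩
  · exact absurd hsl hs
  · have hmem : ∀ p ∈ h :: t, 2 ≤ p.length := by
      intro p hp
      apply hpre.2
      rw [← PySem.List.mem_sorted (key := fun x => x) (rev := false), hsl]
      exact hp
    have hh2 : 2 ≤ h.length := hmem h (List.mem_cons_self ..)
    have h0 : PySem.List.pyGet? h 0 = some h[0] := by
      simpa using PySem.List.pyGet?_ofNat (xs := h) (n := 0) (by omega)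
    have h1 : PySem.List.pyGet? h 1 = some h[1] := by
      simpa using PySem.List.pyGet?_ofNat (xs := h) (n := 1) (by omega)
    simp only [pyB_loop, h0, h1, reduceCtorEq, if_false]
    have hmempty : PySem.List.sorted
        (PySem.Set.union (PySem.Dict.getD PySem.Dict.empty h[0] PySem.Set.empty)
          (PySem.Dict.getD PySem.Dict.empty h[1] PySem.Set.empty)) (fun j => j) false =
        ([] : List Nat) := by
      rw [PySem.Dict.getD_empty, PySem.Dict.getD_empty]
      rfl
    rw [hmempty]
    simp only [ne_eq, not_true_eq_false, if_false, List.nil_append]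
    have hinv1 : InvIdx (pyB_index PySem.Dict.empty h 0) [h] := by
      have := inv_append h [] PySem.Dict.empty inv_empty
      simpa using this
    have hfin : pyB_loop [h] (pyB_index PySem.Dict.empty h 0) (some h) t = pyA_loop [h] h t :=
      loopEq t [h] _ h (fun q hq => hmem q (List.mem_cons_of_mem _ hq)) hinv1
    simpa using hfin.symm
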